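-- pv_equiv track=rewrite | github.com/astridyuan2/Text-Analysis-Project | part02.py | drop_sections
-- ===== SOURCE A (Python) =====
-- def drop_sections(text, section_heads=("references", "external links", "see also", "notes")):
--     """
--     cut the article before trailing non-content sections (quick + crude)
--     looks for headings by keyword in a lowercase copy of the text
--     """
--     lower = text.lower()
--     cut = len(text)
--     for h in section_heads:
--         i = lower.find("\n" + h.lower())
--         if i != -1:
--             cut = min(cut, i)
--     return text[:cut]
-- ===== SOURCE B (Python) =====
-- def drop_sections(text, section_heads=("references", "external links", "see also", "notes")):
--     # one ordered scan over the text's newline positions, first hit wins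
--     heads = tuple(h.lower() for h in section_heads)
--     lower = text.lower()
--     for i, ch in enumerate(lower):
--         if ch == "\n" and lower.startswith(heads, i + 1):
--             return text[:i]
--     return text
-- ===== Notes on version B (the rewrite author's own statement) =====
-- stated objective: faster
-- what changed: Instead of one full lower.find scan per heading followed by a min, B makes a single ordered scan over the lowered text and cuts at the first newline immediately followed by some lowercased heading, returning early on the first hit.
import Mathlib
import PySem

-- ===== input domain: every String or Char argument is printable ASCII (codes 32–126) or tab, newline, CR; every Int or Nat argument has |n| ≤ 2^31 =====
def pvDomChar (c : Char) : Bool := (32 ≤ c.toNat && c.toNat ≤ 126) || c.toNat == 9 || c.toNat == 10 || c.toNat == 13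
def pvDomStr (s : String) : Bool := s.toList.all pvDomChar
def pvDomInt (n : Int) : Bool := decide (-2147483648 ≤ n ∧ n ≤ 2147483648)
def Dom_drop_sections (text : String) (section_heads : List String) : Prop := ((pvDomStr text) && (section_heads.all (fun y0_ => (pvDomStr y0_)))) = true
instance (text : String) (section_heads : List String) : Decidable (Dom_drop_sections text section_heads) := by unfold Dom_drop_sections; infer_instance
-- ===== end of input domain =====

-- B replaces A's one-find-per-heading + min by a single ordered scan that stops at the
-- first newline followed by a heading (objective: alternative decomposition, same result).

-- ===== PORT A =====
def drop_sections (text : String) (section_heads : List String) : String :=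
  let lower := PySem.Str.lower text
  let cut := section_heads.foldl (fun cut h =>
      -- "\n" + h.lower() concatenates one char in front: ported as '\n' :: … (exact)
      let i := PySem.Chars.find lower.toList ('\n' :: PySem.Chars.lower h.toList)
      if i ≠ -1 then min cut i else cut)
    (PySem.Str.len text)
  PySem.Str.slice text none (some cut)

-- ===== PORT B =====
-- the 'for i, ch in enumerate(lower)' loop of Source B; lower.startswith(h, i+1) is
-- startswith on lower[i+1:], exact since 0 ≤ i+1 ≤ len(lower)
def dropSecAltLoop (textL lowerL : List Char) (heads : List (List Char)) : Nat → List Char → List Char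
  | _, [] => textL
  | i, c :: rest =>
      if c == '\n' && heads.any (fun h => PySem.Chars.startswith (lowerL.drop (i+1)) h) then
        textL.take i
      else dropSecAltLoop textL lowerL heads (i+1) rest

def drop_sections_alt (text : String) (section_heads : List String) : String :=
  let heads := section_heads.map (fun h => PySem.Chars.lower h.toList)
  let lowerL := PySem.Chars.lower text.toList
  String.ofList (dropSecAltLoop text.toList lowerL heads 0 lowerL)

-- ===== PRECONDITION & SPEC =====
def Spec_drop_sections (text : String) (section_heads : List String) (out : String) : Prop := out = drop_sections_alt text section_heads
instance (text : String) (section_heads : List String) (out : String) : Decidable (Spec_drop_sections text section_heads out) := by unfold Spec_drop_sections; infer_instance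

-- ===== CLAIM (what is proved, stated in full; the proofs are below) =====
def Claim_equal_drop_sections : Prop := ∀ (text : String) (section_heads : List String), Dom_drop_sections text section_heads → Spec_drop_sections text section_heads (drop_sections text section_heads)

-- ===== LEMMAS AND PROOFS =====

-- A's fold computes a cut r with: 0 ≤ r ≤ acc, r is either the start value or the
-- position of an occurrence of some "\n"+h, and no occurrence lies strictly below r.
theorem foldFind_spec (L : List Char) (hs : List (List Char)) :
    ∀ (acc : Int), 0 ≤ acc →
      0 ≤ hs.foldl (fun cut h =>
            let i := PySem.Chars.find L ('\n' :: h)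
            if i ≠ -1 then min cut i else cut) acc ∧
      hs.foldl (fun cut h =>
            let i := PySem.Chars.find L ('\n' :: h)
            if i ≠ -1 then min cut i else cut) acc ≤ acc ∧
      (hs.foldl (fun cut h =>
            let i := PySem.Chars.find L ('\n' :: h)
            if i ≠ -1 then min cut i else cut) acc = acc ∨
        ∃ h ∈ hs, ('\n' :: h) <+: L.drop (hs.foldl (fun cut h =>
            let i := PySem.Chars.find L ('\n' :: h)
            if i ≠ -1 then min cut i else cut) acc).toNat) ∧
      (∀ j : Nat, (j : Int) < hs.foldl (fun cut h =>
            let i := PySem.Chars.find L ('\n' :: h)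
            if i ≠ -1 then min cut i else cut) acc →
        ¬ ∃ h ∈ hs, ('\n' :: h) <+: L.drop j) := by
  induction hs with
  | nil =>
      intro acc h0
      simp [List.foldl]
      omega
  | cons h tl ih =>
      intro acc h0
      simp only [List.foldl_cons]
      by_cases hf : PySem.Chars.find L ('\n' :: h) ≠ -1
      · have hge : 0 ≤ PySem.Chars.find L ('\n' :: h) := by
          have := PySem.Chars.neg_one_le_find L ('\n' :: h)
          omega
        have hspec := PySem.Chars.find_spec (s := L) (sub := '\n' :: h) hge
        have hstep : (let i := PySem.Chars.find L ('\n' :: h);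
            if i ≠ -1 then min acc i else acc) = min acc (PySem.Chars.find L ('\n' :: h)) := by
          simp [hf]
        rw [hstep]
        have h0' : 0 ≤ min acc (PySem.Chars.find L ('\n' :: h)) := le_min h0 hge
        obtain ⟨r0, rle, rhit, rmin⟩ := ih (min acc (PySem.Chars.find L ('\n' :: h))) h0'
        refine ⟨r0, le_trans rle (min_le_left _ _), ?_, ?_⟩
        · rcases rhit with req | ⟨g, hg, hgp⟩
          · rcases le_or_gt acc (PySem.Chars.find L ('\n' :: h)) with hca | hca
            · left; rw [req]; omega
            · right
              refine ⟨h, by simp, ?_⟩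
              have : min acc (PySem.Chars.find L ('\n' :: h)) = PySem.Chars.find L ('\n' :: h) := by omega
              rw [req, this]
              exact hspec.1
          · right; exact ⟨g, by simp [hg], hgp⟩
        · intro j hj
          rintro ⟨g, hg, hgp⟩
          rcases List.mem_cons.mp hg with rfl | hg'
          · have hjf : (j : Int) < PySem.Chars.find L ('\n' :: g) :=
              lt_of_lt_of_le hj (le_trans rle (min_le_right _ _))
            have hjlt : j < (PySem.Chars.find L ('\n' :: g)).toNat := by omega
            exact hspec.2 j hjlt hgp
          · exact rmin j hj ⟨g, hg', hgp⟩
      · have hstep : (let i := PySem.Chars.find L ('\n' :: h);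
            if i ≠ -1 then min acc i else acc) = acc := by
          simp [hf]
        rw [hstep]
        have hf : PySem.Chars.find L ('\n' :: h) = -1 := not_not.mp hf
        have hno : ¬ ∃ j, ('\n' :: h) <+: L.drop j := by
          rw [PySem.Chars.exists_prefix_drop_iff_isIn, PySem.Chars.isIn_iff_infix]
          exact (PySem.Chars.find_eq_neg_one_iff L ('\n' :: h)).mp hf
        obtain ⟨r0, rle, rhit, rmin⟩ := ih acc h0
        refine ⟨r0, rle, ?_, ?_⟩
        · rcases rhit with req | ⟨g, hg, hgp⟩
          · exact Or.inl req
          · exact Or.inr ⟨g, by simp [hg], hgp⟩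
        · intro j hj
          rintro ⟨g, hg, hgp⟩
          rcases List.mem_cons.mp hg with rfl | hg'
          · exact hno ⟨j, hgp⟩
          · exact rmin j hj ⟨g, hg', hgp⟩

-- B's loop, started at i with no hit below i, returns textL.take cutN whenever cutN
-- has A's characterisation (no hit below cutN; cutN is length or a hit).
theorem loop_eq (T L : List Char) (heads : List (List Char)) (cutN : Nat)
    (hle : cutN ≤ L.length) (hTlen : L.length = T.length)
    (hmin : ∀ j < cutN, ¬ ∃ h ∈ heads, ('\n' :: h) <+: L.drop j)
    (hhit : cutN = L.length ∨ ∃ h ∈ heads, ('\n' :: h) <+: L.drop cutN) :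
    ∀ (rest : List Char) (i : Nat), rest = L.drop i →
      (∀ j < i, ¬ ∃ h ∈ heads, ('\n' :: h) <+: L.drop j) →
      dropSecAltLoop T L heads i rest = T.take cutN := by
  intro rest
  induction rest with
  | nil =>
      intro i hdrop hbelow
      have hlen : L.length ≤ i := List.drop_eq_nil_iff.mp hdrop.symm
      have hcut : cutN = L.length := by
        rcases hhit with h | h
        · exact h
        · by_contra hne
          have hlt : cutN < L.length := lt_of_le_of_ne hle hne
          exact hbelow cutN (by omega) h
      simp [dropSecAltLoop, hcut, hTlen]
  | cons c rest' ih =>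
      intro i hdrop hbelow
      have hilt : i < L.length := by
        rcases Nat.lt_or_ge i L.length with h | h
        · exact h
        · rw [List.drop_eq_nil_of_le h] at hdrop
          exact (List.cons_ne_nil c rest' hdrop).elim
      have hdec : L.drop i = L[i] :: L.drop (i + 1) := List.drop_eq_getElem_cons hilt
      have hc : c = L[i] := by rw [hdec] at hdrop; exact (List.cons.injEq _ _ _ _ ▸ hdrop).1
      have hrest' : rest' = L.drop (i + 1) := by rw [hdec] at hdrop; exact (List.cons.injEq _ _ _ _ ▸ hdrop).2
      have hcond : (c == '\n' && heads.any (fun h => PySem.Chars.startswith (L.drop (i+1)) h)) = true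
          ↔ ∃ h ∈ heads, ('\n' :: h) <+: L.drop i := by
        rw [Bool.and_eq_true, List.any_eq_true]
        constructor
        · rintro ⟨hceq, h, hh, hsw⟩
          refine ⟨h, hh, ?_⟩
          rw [hdec, ← hc, eq_of_beq hceq]
          exact List.cons_prefix_cons.mpr ⟨rfl, (PySem.Chars.startswith_iff _ _).mp hsw⟩
        · rintro ⟨h, hh, hp⟩
          rw [hdec] at hp
          obtain ⟨h1, h2⟩ := List.cons_prefix_cons.mp hp
          refine ⟨by rw [hc, ← h1]; simp, h, hh, (PySem.Chars.startswith_iff _ _).mpr h2⟩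
      by_cases hb : (c == '\n' && heads.any (fun h => PySem.Chars.startswith (L.drop (i+1)) h)) = true
      · have hQ : ∃ h ∈ heads, ('\n' :: h) <+: L.drop i := hcond.mp hb
        have hieq : i = cutN := by
          rcases lt_trichotomy i cutN with h | h | h
          · exact absurd hQ (hmin i h)
          · exact h
          · rcases hhit with hh | hh
            · omega
            · exact absurd hh (hbelow cutN h)
        have hstep : dropSecAltLoop T L heads i (c :: rest') = T.take i := by
          simp [dropSecAltLoop, hb]
        rw [hstep, hieq]
      · have hnQ : ¬ ∃ h ∈ heads, ('\n' :: h) <+: L.drop i := fun h => hb (hcond.mpr h)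
        rw [Bool.not_eq_true] at hb
        have hstep : dropSecAltLoop T L heads i (c :: rest')
            = dropSecAltLoop T L heads (i + 1) rest' := by
          simp [dropSecAltLoop, hb]
        rw [hstep]
        apply ih (i + 1) hrest'
        intro j hj
        rcases Nat.lt_succ_iff_lt_or_eq.mp hj with hj' | rfl
        · exact hbelow j hj'
        · exact hnQ

-- ===== VERDICT (by name: the statement is the Claim_ definition above) =====
theorem drop_sections_spec : Claim_equal_drop_sections := by
  intro text section_heads _
  unfold Spec_drop_sections drop_sections drop_sections_alt
  simp only [PySem.Str.slice]
  set T := text.toList with hT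
  set L := PySem.Chars.lower T with hL
  set heads := section_heads.map (fun h => PySem.Chars.lower h.toList) with hheads
  have hTlen : L.length = T.length := by simp [hL, PySem.Chars.lower]
  -- rewrite A's fold over strings as the fold over the lowered char lists
  have hfold : section_heads.foldl (fun cut h =>
        let i := PySem.Chars.find (PySem.Str.lower text).toList ('\n' :: PySem.Chars.lower h.toList)
        if i ≠ -1 then min cut i else cut) (PySem.Str.len text)
      = heads.foldl (fun cut h =>
        let i := PySem.Chars.find L ('\n' :: h)
        if i ≠ -1 then min cut i else cut) (L.length : Int) := by
    rw [hheads, List.foldl_map]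
    simp only [PySem.Str.toList_lower, PySem.Str.len, hL, hT,
      PySem.Chars.lower, List.length_map, String.length_toList]
  rw [hfold]
  set r := heads.foldl (fun cut h =>
        let i := PySem.Chars.find L ('\n' :: h)
        if i ≠ -1 then min cut i else cut) (L.length : Int) with hr
  obtain ⟨r0, rle, rhit, rmin⟩ := foldFind_spec L heads (L.length : Int) (Int.natCast_nonneg _)
  have hslice : PySem.Chars.slice T none (some r) = T.take r.toNat := by
    rw [PySem.Chars.slice_eq_listSlice]
    exact PySem.List.slice_to T r0
  rw [hslice]
  have hcut_le : r.toNat ≤ L.length := by omega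
  have hhit' : r.toNat = L.length ∨ ∃ h ∈ heads, ('\n' :: h) <+: L.drop r.toNat := by
    rcases rhit with h | h
    · left; omega
    · right; exact h
  have hmin' : ∀ j < r.toNat, ¬ ∃ h ∈ heads, ('\n' :: h) <+: L.drop j := by
    intro j hj
    exact rmin j (by omega)
  have := loop_eq T L heads r.toNat hcut_le hTlen hmin' hhit' L 0 (by simp) (by omega)
  rw [this]
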